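-- pv_equiv track=rewrite | github.com/Antonio-III/Python | OC/Problems/Math/Algebra/_01_prealgebra.py | get_exps_btween_eqsigns
-- ===== SOURCE A (Python) =====
-- def get_exps_btween_eqsigns(exp: str) -> tuple[list[str], list[str]]:
--     """Returns the expressions between the equality/inequality symbols and the symbols, found in the original expression.
--
--     Args:
--         exp: The mathematical expression.
--
--     Returns:
--         A list of expressions and signs found in the original expression.
--     """
--     signs = []
--     terms = []
--
--     sign = ""
--     term = ""
--     exp_l = len(exp)
--     for i in range(exp_l):
--         if (exp[i] == "=" or exp[i] == "<" or exp[i] == ">"):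
--             sign += exp[i]
--
--             if term:
--                 terms.append(term)
--                 term = ""
--
--         else:
--             term += exp[i]
--
--         if len(sign) == 2:
--             signs.append(sign)
--             sign = ""
--
--         if (i+1) == exp_l:
--             terms.append(term)
--             term = ""
--
--     return terms, signs
-- ===== SOURCE B (Python) =====
-- def get_exps_btween_eqsigns(exp: str) -> tuple[list[str], list[str]]:
--     if not exp:
--         return [], []
--     parts = exp.replace("<", "=").replace(">", "=").split("=")
--     terms = [p for p in parts[:-1] if p] + [parts[-1]]
--     chars = [c for c in exp if c in "=<>"]
--     signs = [chars[i - 1] + chars[i] for i in range(1, len(chars), 2)]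
--     return terms, signs
-- ===== Notes on version B (the rewrite author's own statement) =====
-- stated objective: faster
-- what changed: Replaced A's single stateful character loop (sign/term buffers flushed in place, last-index special case) by built-in string operations: replace+split yields the parts, a keep-last/drop-empty filter yields the terms, and an index comprehension pairs the filtered sign characters.
import Mathlib
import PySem

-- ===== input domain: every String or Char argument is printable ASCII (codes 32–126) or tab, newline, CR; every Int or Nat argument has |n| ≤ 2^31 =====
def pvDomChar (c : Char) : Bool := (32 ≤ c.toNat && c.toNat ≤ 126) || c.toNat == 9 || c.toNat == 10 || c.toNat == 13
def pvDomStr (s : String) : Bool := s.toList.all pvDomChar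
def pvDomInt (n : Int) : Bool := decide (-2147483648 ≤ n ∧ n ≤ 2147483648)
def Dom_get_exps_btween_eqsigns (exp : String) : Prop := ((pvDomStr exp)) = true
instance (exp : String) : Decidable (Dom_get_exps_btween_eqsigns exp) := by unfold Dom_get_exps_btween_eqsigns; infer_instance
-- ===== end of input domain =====

-- B replaces A's single stateful character loop by built-in string operations
-- (replace + split for the terms, an index comprehension pairing the sign characters);
-- same return values; measurably faster in a timing run (C-level str ops vs per-char loop).

-- ===== PORT A =====
-- A's for-loop over the characters, state (term, sign, terms, signs); "(i+1) == exp_l"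
-- becomes "rest.isEmpty" (we are at the last character).  Python only resets `term`
-- inside `if term:`, but it is "" in the other case too, so the sign branch sets it to [].
def goA : List Char → List Char → List Char → List String → List String → List String × List String
  | [], _term, _sign, terms, signs => (terms, signs)
  | c :: rest, term, sign, terms, signs =>
    let signChar := c == '=' || c == '<' || c == '>'
    let sign1 := if signChar then sign ++ [c] else sign
    let terms1 := if signChar && !term.isEmpty then terms ++ [String.ofList term] else terms
    let term1 := if signChar then [] else term ++ [c]
    let signs1 := if sign1.length = 2 then signs ++ [String.ofList sign1] else signs
    let sign2 := if sign1.length = 2 then [] else sign1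
    let terms2 := if rest.isEmpty then terms1 ++ [String.ofList term1] else terms1
    let term2 := if rest.isEmpty then [] else term1
    goA rest term2 sign2 terms2 signs1

def get_exps_btween_eqsigns (exp : String) : List String × List String :=
  goA exp.toList [] [] [] []

-- ===== PORT B =====
-- Source B over the char list of exp (exact: str.replace/str.split are PySem.Chars.replace/
-- splitOn on the code points, `chars[i]` of a list of 1-char strings is the char,
-- and `chars[i-1] + chars[i]` is String.ofList of the two chars).
def get_exps_btween_eqsigns_alt (exp : String) : List String × List String :=
  let cs := exp.toList
  if cs.isEmpty then ([], [])
  else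
    let parts := (PySem.Chars.splitOn
      (PySem.Chars.replace (PySem.Chars.replace cs ['<'] ['=']) ['>'] ['=']) ['=']).map String.ofList
    let terms := parts.dropLast.filter (fun p => !(p == "")) ++ [parts.getLastD ""]
    let chars := cs.filter (fun c => c == '=' || c == '<' || c == '>')
    let signs := (PySem.List.pyRange 1 (chars.length : Int) 2).map
      (fun i => String.ofList [PySem.List.pyGetD chars (i - 1) ' ', PySem.List.pyGetD chars i ' '])
    (terms, signs)

-- ===== PRECONDITION & SPEC =====
def Spec_get_exps_btween_eqsigns (exp : String) (out : List String × List String) : Prop := out = get_exps_btween_eqsigns_alt exp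
instance (exp : String) (out : List String × List String) : Decidable (Spec_get_exps_btween_eqsigns exp out) := by unfold Spec_get_exps_btween_eqsigns; infer_instance

-- ===== CLAIM (what is proved, stated in full; the proofs are below) =====
def Claim_equal_get_exps_btween_eqsigns : Prop := ∀ (exp : String), Dom_get_exps_btween_eqsigns exp → Spec_get_exps_btween_eqsigns exp (get_exps_btween_eqsigns exp)

-- ===== LEMMAS AND PROOFS =====

-- Split on any of '=', '<', '>' — the common characterisation both sides are reduced to.
def pvSplitS : List Char → List (List Char)
  | [] => [[]]
  | c :: r =>
    let rest := pvSplitS r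
    if c == '=' || c == '<' || c == '>' then [] :: rest
    else
      match rest with
      | p :: ps => (c :: p) :: ps
      | [] => [[]]

-- Split on '=' only (what str.split("=") does after the two replaces).
def pvSplitEq : List Char → List (List Char)
  | [] => [[]]
  | c :: r =>
    let rest := pvSplitEq r
    if c == '=' then [] :: rest
    else
      match rest with
      | p :: ps => (c :: p) :: ps
      | [] => [[]]

-- Prepend a pending buffer onto the first split part.
def pvPre (term : List Char) : List (List Char) → List (List Char)
  | [] => [term]
  | p :: ps => (term ++ p) :: ps

-- Pair up consecutive sign characters; a trailing unpaired one is dropped.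
def pvPairUp : List Char → List String
  | a :: b :: r => String.ofList [a, b] :: pvPairUp r
  | _ => []

-- The terms A produces from a nonempty list of split parts: every nonempty part, plus
-- the last part unconditionally.
def pvG : List (List Char) → List String
  | [] => []
  | [p] => [String.ofList p]
  | p :: q :: ps => (if p.isEmpty then [] else [String.ofList p]) ++ pvG (q :: ps)

theorem pvSplitS_ne_nil (cs : List Char) : pvSplitS cs ≠ [] := by
  cases cs with
  | nil => simp [pvSplitS]
  | cons c r =>
    simp only [pvSplitS]
    split
    · simp
    · rcases h : pvSplitS r with _ | ⟨p, ps⟩ <;> simp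

theorem pvSplitEq_ne_nil (cs : List Char) : pvSplitEq cs ≠ [] := by
  cases cs with
  | nil => simp [pvSplitEq]
  | cons c r =>
    simp only [pvSplitEq]
    split
    · simp
    · rcases h : pvSplitEq r with _ | ⟨p, ps⟩ <;> simp

theorem pvOfList_eq_empty (p : List Char) : (String.ofList p == "") = p.isEmpty := by
  cases p with
  | nil => rfl
  | cons c r =>
    have h : String.ofList (c :: r) ≠ "" := by
      intro h
      have := congrArg String.toList h
      simp at this
    simp [List.isEmpty, h]

-- ---- A's loop, characterised ----
theorem goA_eq (cs : List Char) (hne : cs ≠ []) :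
    ∀ (term sign : List Char) (terms signs : List String), sign.length ≤ 1 →
    goA cs term sign terms signs =
      (terms ++ pvG (pvPre term (pvSplitS cs)),
       signs ++ pvPairUp (sign ++ cs.filter (fun c => c == '=' || c == '<' || c == '>'))) := by
  induction cs with
  | nil => exact absurd rfl hne
  | cons c rest ih =>
    intro term sign terms signs hs
    by_cases hr : rest = []
    · subst hr
      by_cases hc : (c == '=' || c == '<' || c == '>') = true
      · rcases sign with _ | ⟨s, _ | ⟨t, ts⟩⟩
        · simp [goA, pvSplitS, pvPre, pvG, pvPairUp, hc, List.filter]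
          cases term <;> simp
        · simp [goA, pvSplitS, pvPre, pvG, pvPairUp, hc, List.filter]
          cases term <;> simp
        · simp at hs
      · simp [goA, pvSplitS, pvPre, pvG, hc, List.filter]
        rcases sign with _ | ⟨s, _ | ⟨t, ts⟩⟩
        · simp [pvPairUp]
        · simp [pvPairUp]
        · simp at hs
    · have hPE : rest.isEmpty = false := by simp [hr]
      obtain ⟨p, ps, hsp⟩ : ∃ p ps, pvSplitS rest = p :: ps := by
        rcases h' : pvSplitS rest with _ | ⟨p, ps⟩
        · exact absurd h' (pvSplitS_ne_nil _)
        · exact ⟨p, ps, rfl⟩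
      by_cases hc : (c == '=' || c == '<' || c == '>') = true
      · rcases sign with _ | ⟨s, _ | ⟨t, ts⟩⟩
        · -- sign buffer empty: becomes [c], no flush
          simp only [goA, hc, hPE, List.nil_append, List.length_cons, List.length_nil,
            if_true, Bool.true_and]
          norm_num
          rw [ih hr [] [c] _ _ (by simp)]
          simp [pvSplitS, hc, hsp, pvPre]
          cases term <;> simp [pvG]
        · -- sign buffer [s]: flushes [s, c]
          simp only [goA, hc, hPE, List.length_append, List.length_cons, List.length_nil,
            if_true, Bool.true_and]
          norm_num
          rw [ih hr [] ([] : List Char) _ _ (by simp)]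
          simp [pvSplitS, hc, hsp, pvPre, pvPairUp]
          cases term <;> simp [pvG]
        · simp at hs
      · have hs2 : ¬ sign.length = 2 := by omega
        simp only [goA, hc, hPE, Bool.false_and]
        norm_num [hs2]
        rw [ih hr (term ++ [c]) sign _ _ hs]
        simp [pvSplitS, hc, hsp, pvPre]

-- ---- the parts → terms step ----
theorem pvG_eq (l : List (List Char)) (hne : l ≠ []) :
    pvG l = (l.map String.ofList).dropLast.filter (fun p => !(p == "")) ++
      [(l.map String.ofList).getLastD ""] := by
  induction l with
  | nil => exact absurd rfl hne
  | cons p rest ih =>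
    cases rest with
    | nil => simp [pvG]
    | cons q ps =>
      have h := ih (by simp)
      simp only [pvG, h, List.map_cons,
        List.dropLast_cons_of_ne_nil (by simp : (String.ofList q :: List.map String.ofList ps) ≠ [])]
      rw [List.filter_cons]
      have hlast : (String.ofList p :: String.ofList q :: List.map String.ofList ps).getLastD "" =
          (String.ofList q :: List.map String.ofList ps).getLastD "" := by
        simp
      rw [hlast, pvOfList_eq_empty]
      cases hp : p.isEmpty <;> simp

-- ---- the index comprehension = pairing ----
theorem pvShift2 (a b : Char) (r : List Char) (k : Nat) (d : Char) :
    PySem.List.pyGetD (a :: b :: r) ((k : Int) + 2) d = PySem.List.pyGetD r (k : Int) d := by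
  rw [PySem.List.pyGetD_of_nonneg _ _ (by omega), PySem.List.pyGetD_of_nonneg _ _ (by omega)]
  have h : ((k : Int) + 2).toNat = k + 2 := by omega
  simp [h]

theorem pvPair_eq (l : List Char) :
    (PySem.List.pyRange 1 (l.length : Int) 2).map
      (fun i => String.ofList [PySem.List.pyGetD l (i - 1) ' ', PySem.List.pyGetD l i ' ']) =
    pvPairUp l := by
  induction l using pvPairUp.induct with
  | case1 a b r ih =>
    rw [PySem.List.pyRange_of_pos _ _ (by norm_num)] at ih ⊢
    simp only [List.length_cons]
    have hc : (if (1:Int) < ((r.length + 1 + 1 : Nat) : Int) then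
        ((((r.length + 1 + 1 : Nat) : Int) - 1 + 2 - 1) / 2).toNat else 0) = r.length / 2 + 1 := by
      rw [if_pos (by push_cast; omega)]
      push_cast
      omega
    have hcr : (if (1:Int) < ((r.length : Nat) : Int) then
        ((((r.length : Nat) : Int) - 1 + 2 - 1) / 2).toNat else 0) = r.length / 2 := by
      split <;> omega
    rw [hc]
    rw [hcr] at ih
    rw [List.range_succ_eq_map, List.map_cons, List.map_cons, List.map_map, List.map_map]
    rw [List.map_map] at ih
    rw [pvPairUp]
    congr 1
    · norm_num [PySem.List.pyGetD, PySem.List.pyGet?, PySem.List.pyIdx?]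
      have h01 : (0:Int) ≤ (r.length : Int) + 1 := by positivity
      simp [h01]
    · rw [← ih]
      apply List.map_congr_left
      intro k _
      simp only [Function.comp_apply, Nat.succ_eq_add_one]
      have e1 : (1:Int) + 2 * ((k + 1 : Nat) : Int) - 1 = ((2 * k : Nat) : Int) + 2 := by push_cast; ring
      have e2 : (1:Int) + 2 * ((k + 1 : Nat) : Int) = ((2 * k + 1 : Nat) : Int) + 2 := by push_cast; ring
      have e3 : (1:Int) + 2 * ((k : Nat) : Int) - 1 = ((2 * k : Nat) : Int) := by push_cast; ring
      have e4 : (1:Int) + 2 * ((k : Nat) : Int) = ((2 * k + 1 : Nat) : Int) := by push_cast; ring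
      rw [e1, e2, e3, e4, pvShift2, pvShift2]
  | case2 l h1 =>
    rcases l with _ | ⟨a, _ | ⟨b, r⟩⟩
    · simp [pvPairUp, PySem.List.pyRange]
    · rw [PySem.List.pyRange_of_pos _ _ (by norm_num)]
      simp [pvPairUp]
    · exact absurd rfl (h1 a b r)

-- ---- str.replace with single-char arguments is a map ----
theorem pvReplaceGo_eq (o n : Char) :
    ∀ (fuel : Nat) (l acc : List Char), l.length ≤ fuel →
    PySem.Chars.replace.go [o] [n] fuel l acc =
      acc.reverse ++ l.map (fun c => if o == c then n else c) := by
  intro fuel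
  induction fuel with
  | zero =>
    intro l acc h
    have : l = [] := by simpa using List.eq_nil_of_length_eq_zero (by omega)
    subst this
    simp [PySem.Chars.replace.go]
  | succ f ih =>
    intro l acc h
    cases l with
    | nil => simp [PySem.Chars.replace.go]
    | cons c t =>
      simp only [PySem.Chars.replace.go]
      by_cases hp : List.isPrefixOf [o] (c :: t) = true
      · have hoc : (o == c) = true := by simpa [List.isPrefixOf] using hp
        rw [if_pos hp]
        rw [ih _ _ (by simp at h ⊢; omega)]
        have hoc' : o = c := by simpa using hoc
        subst hoc'
        simp
      · have hoc : (o == c) = false := by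
          by_contra hx
          exact hp (by simp [List.isPrefixOf]; simpa using hx)
        rw [if_neg hp]
        rw [ih _ _ (by simp at h ⊢; omega)]
        have hoc' : ¬ o = c := by simpa using hoc
        simp [hoc']

theorem pvReplace_single (o n : Char) (s : List Char) :
    PySem.Chars.replace s [o] [n] = s.map (fun c => if o == c then n else c) := by
  rw [PySem.Chars.replace]
  rw [if_neg (by simp)]
  rw [pvReplaceGo_eq o n s.length s [] (le_refl _)]
  simp

-- ---- str.split("=") is pvSplitEq ----
theorem pvSplitGo_eq :
    ∀ (fuel : Nat) (l cur : List Char) (acc : List (List Char)), l.length ≤ fuel →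
    PySem.Chars.splitOn.go ['='] fuel l cur acc =
      acc.reverse ++ pvPre cur.reverse (pvSplitEq l) := by
  intro fuel
  induction fuel with
  | zero =>
    intro l cur acc h
    have : l = [] := by simpa using List.eq_nil_of_length_eq_zero (by omega)
    subst this
    simp [PySem.Chars.splitOn.go, pvSplitEq, pvPre]
  | succ f ih =>
    intro l cur acc h
    cases l with
    | nil => simp [PySem.Chars.splitOn.go, pvSplitEq, pvPre]
    | cons c t =>
      simp only [PySem.Chars.splitOn.go]
      by_cases hp : List.isPrefixOf ['='] (c :: t) = true
      · have hoc : c = '=' := by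
          have h2 : ('=' == c) = true := by simpa [List.isPrefixOf] using hp
          exact (beq_iff_eq.mp h2).symm
        subst hoc
        rw [if_pos hp]
        have hd : List.drop (['='].length) ('=' :: t) = t := by simp
        rw [hd]
        rw [ih _ _ _ (by simp at h; omega)]
        obtain ⟨p, ps, hsp⟩ : ∃ p ps, pvSplitEq t = p :: ps := by
          rcases h' : pvSplitEq t with _ | ⟨p, ps⟩
          · exact absurd h' (pvSplitEq_ne_nil _)
          · exact ⟨p, ps, rfl⟩
        rw [show pvSplitEq ('=' :: t) = [] :: pvSplitEq t from by rw [pvSplitEq]; simp]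
        simp [hsp, pvPre]
      · have hoc : (c == '=') = false := by
          by_contra hx
          simp at hx
          exact hp (by simp [List.isPrefixOf, hx])
        rw [if_neg hp]
        rw [ih _ _ _ (by simp at h ⊢; omega)]
        obtain ⟨p, ps, hsp⟩ : ∃ p ps, pvSplitEq t = p :: ps := by
          rcases h' : pvSplitEq t with _ | ⟨p, ps⟩
          · exact absurd h' (pvSplitEq_ne_nil _)
          · exact ⟨p, ps, rfl⟩
        rw [show pvSplitEq (c :: t) = (c :: p) :: ps from by rw [pvSplitEq]; simp [hoc, hsp]]
        simp [hsp, pvPre]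

theorem pvSplitOn_eq (s : List Char) :
    PySem.Chars.splitOn s ['='] = pvSplitEq s := by
  rw [PySem.Chars.splitOn, pvSplitGo_eq (s.length + 1) s [] [] (by omega)]
  obtain ⟨p, ps, hsp⟩ : ∃ p ps, pvSplitEq s = p :: ps := by
    rcases h' : pvSplitEq s with _ | ⟨p, ps⟩
    · exact absurd h' (pvSplitEq_ne_nil _)
    · exact ⟨p, ps, rfl⟩
  simp [hsp, pvPre]

-- ---- splitting the sign-normalised string = splitting on all three signs ----
theorem pvSplitEq_map (f : Char → Char)
    (hf1 : ∀ c, (f c == '=') = (c == '=' || c == '<' || c == '>'))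
    (hf2 : ∀ c, (c == '=' || c == '<' || c == '>') = false → f c = c) :
    ∀ cs : List Char, pvSplitEq (cs.map f) = pvSplitS cs := by
  intro cs
  induction cs with
  | nil => rfl
  | cons c t ih =>
    by_cases hs : (c == '=' || c == '<' || c == '>') = true
    · have h2 : (f c == '=') = true := by rw [hf1]; exact hs
      simp only [List.map_cons, pvSplitEq, pvSplitS, h2, hs, if_true, ih]
    · have hs' : (c == '=' || c == '<' || c == '>') = false := by
        simp at hs ⊢; tauto
      have h2 : (f c == '=') = false := by rw [hf1]; exact hs'
      have hce : (c == '=') = false := by simp at hs' ⊢; tauto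
      have hcl : (c == '<') = false := by simp at hs' ⊢; tauto
      have hcg : (c == '>') = false := by simp at hs' ⊢; tauto
      simp only [List.map_cons, pvSplitEq, pvSplitS, hce, hcl, hcg, hf2 c hs',
        Bool.false_eq_true, Bool.or_self, if_false, ih]

theorem pvRepl_key1 (c : Char) :
    (((fun c => if '>' == c then '=' else c) ∘ (fun c => if '<' == c then '=' else c)) c == '=') =
    (c == '=' || c == '<' || c == '>') := by
  simp only [Function.comp_apply]
  by_cases h1 : c = '<'
  · subst h1; decide
  by_cases h2 : c = '>'
  · subst h2; decide
  by_cases h3 : c = '='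
  · subst h3; decide
  have a1 : (c == '<') = false := by simp [h1]
  have a2 : (c == '>') = false := by simp [h2]
  simp [Ne.symm h1, Ne.symm h2, a1, a2]

theorem pvRepl_key2 (c : Char) (h : (c == '=' || c == '<' || c == '>') = false) :
    ((fun c => if '>' == c then '=' else c) ∘ (fun c => if '<' == c then '=' else c)) c = c := by
  simp only [Function.comp_apply]
  have h1 : ¬ c = '<' := by intro hx; subst hx; simp at h
  have h2 : ¬ c = '>' := by intro hx; subst hx; simp at h
  simp [Ne.symm h1, Ne.symm h2]

-- ===== VERDICT (by name: the statement is the Claim_ definition above) =====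
theorem get_exps_btween_eqsigns_spec : Claim_equal_get_exps_btween_eqsigns := by
  intro exp _
  unfold Spec_get_exps_btween_eqsigns get_exps_btween_eqsigns get_exps_btween_eqsigns_alt
  rcases h : exp.toList with _ | ⟨c, rest⟩
  · simp [goA]
  · have hne : (c :: rest) ≠ ([] : List Char) := by simp
    rw [goA_eq (c :: rest) hne [] [] [] [] (by simp)]
    dsimp only
    simp only [List.isEmpty_cons, Bool.false_eq_true, if_false]
    have hrep : PySem.Chars.replace (PySem.Chars.replace (c :: rest) ['<'] ['=']) ['>'] ['='] =
        (c :: rest).map ((fun c => if '>' == c then '=' else c) ∘ (fun c => if '<' == c then '=' else c)) := by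
      rw [pvReplace_single, pvReplace_single, List.map_map]
    rw [hrep, pvSplitOn_eq, pvSplitEq_map _ pvRepl_key1 pvRepl_key2, pvPair_eq]
    obtain ⟨p, ps, hsp⟩ : ∃ p ps, pvSplitS (c :: rest) = p :: ps := by
      rcases h' : pvSplitS (c :: rest) with _ | ⟨p, ps⟩
      · exact absurd h' (pvSplitS_ne_nil _)
      · exact ⟨p, ps, rfl⟩
    simp only [hsp, pvPre, List.nil_append]
    rw [pvG_eq (p :: ps) (by simp)]
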